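-- pv_equiv track=rewrite | github.com/flohlen/University | Informatik/EidI/Blatt7/aufgabe_3.py | eintrag
-- ===== SOURCE A (Python) =====
-- def hat_schlaufe(buch, i):
--
-- 	if buch[i] == i:
-- 		return True
-- 	else:
-- 		return False
--
-- def laenge(buch, i):
-- 	l = 1
-- 	while not hat_schlaufe(buch,i):
-- 		l+=1
-- 		i = buch[i]
--
-- 	return l
--
-- def eintrag(buch, i, j):
--
-- 	l = laenge(buch,i)
-- 	if j >= l:
-- 		return -1
--
-- 	pos = 0
-- 	while not hat_schlaufe(buch,i):
-- 		pos+=1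
-- 		if pos == j:
-- 			return buch[i]
-- 		i = buch[i]
-- 	return -1
-- ===== SOURCE B (Python) =====
-- def eintrag(buch, i, j):
--     chain = [i]
--     while buch[chain[-1]] != chain[-1]:
--         chain.append(buch[chain[-1]])
--     return chain[j] if 1 <= j < len(chain) else -1
-- ===== Notes on version B (the rewrite author's own statement) =====
-- stated objective: simpler
-- what changed: B builds the visited chain once as an explicit list and answers by direct indexing with a single 1 <= j < len(chain) bound, instead of A's two separate pointer walks (one to compute the length, one re-walk counting positions).
import Mathlib
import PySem

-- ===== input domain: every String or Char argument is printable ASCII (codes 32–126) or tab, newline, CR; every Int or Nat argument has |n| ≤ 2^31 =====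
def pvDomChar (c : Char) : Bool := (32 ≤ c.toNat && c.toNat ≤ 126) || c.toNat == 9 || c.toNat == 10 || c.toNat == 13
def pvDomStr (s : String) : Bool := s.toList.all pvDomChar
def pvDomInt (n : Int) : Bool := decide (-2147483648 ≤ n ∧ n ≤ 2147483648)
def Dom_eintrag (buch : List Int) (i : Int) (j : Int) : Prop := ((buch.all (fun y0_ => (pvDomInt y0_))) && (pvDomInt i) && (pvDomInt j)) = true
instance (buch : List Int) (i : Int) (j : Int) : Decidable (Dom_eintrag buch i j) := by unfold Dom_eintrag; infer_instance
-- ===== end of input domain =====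

-- B replaces A's two pointer walks (length pass + position-counting re-walk) by one
-- chain-building pass followed by direct indexing; same cost, simpler structure.

-- ===== PORT A =====
-- Python's while-loops become fuel recursion; the fuel (length+1) is sufficient on every
-- input admitted by Pre_eintrag (where the walk reaches a self-loop), so inside Pre_ the
-- 'none'/default branches are never taken. hat_schlaufe is the 'v = i' test on buch[i].
def laengeLoop (buch : List Int) : Nat → Int → Int → Option Int
  | 0, _, _ => none
  | fuel+1, l, i =>
    match PySem.List.pyGet? buch i with
    | none => none
    | some v => if v = i then some l else laengeLoop buch fuel (l + 1) v

def laenge (buch : List Int) (i : Int) : Option Int :=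
  laengeLoop buch (buch.length + 1) 1 i

def eintragLoop (buch : List Int) (j : Int) : Nat → Int → Int → Int
  | 0, _, _ => 0
  | fuel+1, pos, i =>
    match PySem.List.pyGet? buch i with
    | none => 0
    | some v =>
      if v = i then -1
      else if pos + 1 = j then v
      else eintragLoop buch j fuel (pos + 1) v

def eintrag (buch : List Int) (i : Int) (j : Int) : Int :=
  match laenge buch i with
  | none => 0
  | some l => if j ≥ l then -1 else eintragLoop buch j (buch.length + 1) 0 i

-- ===== PORT B =====
-- chain is built with a cons-accumulator and reversed at the end (the Python appends).
def buildChain (buch : List Int) : Nat → Int → List Int → Option (List Int)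
  | 0, _, _ => none
  | fuel+1, last, acc =>
    match PySem.List.pyGet? buch last with
    | none => none
    | some nxt => if nxt = last then some acc.reverse else buildChain buch fuel nxt (nxt :: acc)

def eintrag_alt (buch : List Int) (i : Int) (j : Int) : Int :=
  match buildChain buch (buch.length + 1) i [i] with
  | none => 0
  | some chain =>
    if 1 ≤ j ∧ j < (chain.length : Int) then (PySem.List.pyGet? chain j).getD (-1) else -1

-- ===== PRECONDITION & SPEC =====
-- pyStep: one pointer step of the successor map x ↦ buch[x] (none once an access raises).
def pyStep (buch : List Int) : Option Int → Option Int
  | none => none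
  | some x => PySem.List.pyGet? buch x

-- chaseN buch n i = n-fold iterate of the successor map: the node n pointer steps from i.
def chaseN (buch : List Int) (n : Nat) (i : Int) : Option Int :=
  (pyStep buch)^[n] (some i)

-- fixAt: after n steps the walk sits on a self-loop (buch[x] == x), all accesses in range.
def fixAt (buch : List Int) (i : Int) (n : Nat) : Bool :=
  match chaseN buch n i with
  | none => false
  | some x => PySem.List.pyGet? buch x == some x

-- Pre_: the pointer walk from i reaches a self-loop (within buch.length steps — always
-- enough when it terminates at all); exactly the inputs where A neither raises nor loops forever.
def Pre_eintrag (buch : List Int) (i : Int) (j : Int) : Prop :=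
  ∃ n ∈ List.range (buch.length + 1), fixAt buch i n = true

instance (buch : List Int) (i : Int) (j : Int) : Decidable (Pre_eintrag buch i j) := by
  unfold Pre_eintrag; infer_instance

def pvWitness_eintrag : List Int × Int × Int := ([1, 1], 0, 1)

def Spec_eintrag (buch : List Int) (i : Int) (j : Int) (out : Int) : Prop := out = eintrag_alt buch i j
instance (buch : List Int) (i : Int) (j : Int) (out : Int) : Decidable (Spec_eintrag buch i j out) := by unfold Spec_eintrag; infer_instance

-- ===== CLAIM (what is proved, stated in full; the proofs are below) =====
def Claim_equal_eintrag : Prop := ∀ (buch : List Int) (i : Int) (j : Int), Dom_eintrag buch i j → Pre_eintrag buch i j → Spec_eintrag buch i j (eintrag buch i j)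

-- ===== LEMMAS AND PROOFS =====

-- MinFix buch i m: m is the exact number of steps from i to the first self-loop.
def MinFix (buch : List Int) (i : Int) (m : Nat) : Prop :=
  fixAt buch i m = true ∧ ∀ k < m, fixAt buch i k = false

-- the nodes visited after i, in order (m of them under MinFix).
def tailChain (buch : List Int) : Nat → Int → List Int
  | 0, _ => []
  | n+1, i =>
    match PySem.List.pyGet? buch i with
    | none => []
    | some v => v :: tailChain buch n v

theorem chaseN_succ_of_get {buch : List Int} {i v : Int} (hg : PySem.List.pyGet? buch i = some v)
    (n : Nat) : chaseN buch (n+1) i = chaseN buch n v := by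
  simp only [chaseN, Function.iterate_succ_apply, pyStep, hg]

theorem fixAt_succ_of_get {buch : List Int} {i v : Int} (hg : PySem.List.pyGet? buch i = some v)
    (n : Nat) : fixAt buch i (n+1) = fixAt buch v n := by
  simp only [fixAt, chaseN_succ_of_get hg]

theorem minFix_zero {buch : List Int} {i : Int} (h : MinFix buch i 0) :
    PySem.List.pyGet? buch i = some i := by
  have h0 := h.1
  simp only [fixAt, chaseN, Function.iterate_zero_apply] at h0
  exact eq_of_beq h0

theorem minFix_succ {buch : List Int} {i : Int} {m : Nat} (h : MinFix buch i (m+1)) :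
    ∃ v, PySem.List.pyGet? buch i = some v ∧ v ≠ i ∧ MinFix buch v m := by
  obtain ⟨h1, h2⟩ := h
  cases hg : PySem.List.pyGet? buch i with
  | none =>
    exfalso
    simp only [fixAt, chaseN, Function.iterate_succ_apply, pyStep, hg,
      Function.iterate_fixed] at h1
    exact Bool.noConfusion h1
  | some v =>
    refine ⟨v, rfl, ?_, ?_, ?_⟩
    · intro hvi
      have := h2 0 (Nat.succ_pos m)
      simp only [fixAt, chaseN, Function.iterate_zero_apply, hg, hvi] at this
      simp at this
    · rw [← fixAt_succ_of_get hg]; exact h1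
    · intro k hk
      have := h2 (k+1) (by omega)
      rw [fixAt_succ_of_get hg] at this
      exact this

theorem laengeLoop_eq {buch : List Int} : ∀ (m : Nat) (i l : Int) (fuel : Nat),
    MinFix buch i m → m < fuel → laengeLoop buch fuel l i = some (l + m) := by
  intro m
  induction m with
  | zero =>
    intro i l fuel h hf
    obtain ⟨fuel, rfl⟩ := Nat.exists_eq_succ_of_ne_zero (by omega : fuel ≠ 0)
    simp [laengeLoop, minFix_zero h]
  | succ m ih =>
    intro i l fuel h hf
    obtain ⟨v, hg, hvi, hmin⟩ := minFix_succ h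
    obtain ⟨fuel, rfl⟩ := Nat.exists_eq_succ_of_ne_zero (by omega : fuel ≠ 0)
    simp only [laengeLoop, hg, if_neg hvi]
    rw [ih v (l+1) fuel hmin (by omega)]
    congr 1
    push_cast
    ring

theorem buildChain_eq {buch : List Int} : ∀ (m : Nat) (i : Int) (acc : List Int) (fuel : Nat),
    MinFix buch i m → m < fuel →
    buildChain buch fuel i acc = some (acc.reverse ++ tailChain buch m i) := by
  intro m
  induction m with
  | zero =>
    intro i acc fuel h hf
    obtain ⟨fuel, rfl⟩ := Nat.exists_eq_succ_of_ne_zero (by omega : fuel ≠ 0)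
    simp [buildChain, minFix_zero h, tailChain]
  | succ m ih =>
    intro i acc fuel h hf
    obtain ⟨v, hg, hvi, hmin⟩ := minFix_succ h
    obtain ⟨fuel, rfl⟩ := Nat.exists_eq_succ_of_ne_zero (by omega : fuel ≠ 0)
    simp only [buildChain, hg, if_neg hvi]
    rw [ih v (v :: acc) fuel hmin (by omega)]
    simp [tailChain, hg]

theorem tailChain_length {buch : List Int} : ∀ (m : Nat) (i : Int),
    MinFix buch i m → (tailChain buch m i).length = m := by
  intro m
  induction m with
  | zero => intro i _; rfl
  | succ m ih =>
    intro i h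
    obtain ⟨v, hg, _, hmin⟩ := minFix_succ h
    simp [tailChain, hg, ih v hmin]

theorem tailChain_elem {buch : List Int} : ∀ (m : Nat) (i : Int) (k : Nat),
    MinFix buch i m → k < m → (tailChain buch m i)[k]? = chaseN buch (k+1) i := by
  intro m
  induction m with
  | zero => intro i k _ hk; omega
  | succ m ih =>
    intro i k h hk
    obtain ⟨v, hg, _, hmin⟩ := minFix_succ h
    cases k with
    | zero => simp [tailChain, hg, chaseN, pyStep]
    | succ k =>
      simp only [tailChain, hg, List.getElem?_cons_succ]
      rw [ih v k hmin (by omega), chaseN_succ_of_get hg]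

theorem eintragLoop_eq {buch : List Int} (j : Int) : ∀ (m : Nat) (i pos : Int) (fuel : Nat),
    MinFix buch i m → m < fuel →
    eintragLoop buch j fuel pos i =
      if pos < j ∧ j ≤ pos + m then (chaseN buch (j - pos).toNat i).getD 0 else -1 := by
  intro m
  induction m with
  | zero =>
    intro i pos fuel h hf
    obtain ⟨fuel, rfl⟩ := Nat.exists_eq_succ_of_ne_zero (by omega : fuel ≠ 0)
    have : ¬ (pos < j ∧ j ≤ pos + (0:Nat)) := by push_cast; omega
    simp [eintragLoop, minFix_zero h]
  | succ m ih =>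
    intro i pos fuel h hf
    obtain ⟨v, hg, hvi, hmin⟩ := minFix_succ h
    obtain ⟨fuel, rfl⟩ := Nat.exists_eq_succ_of_ne_zero (by omega : fuel ≠ 0)
    simp only [eintragLoop, hg, if_neg hvi]
    by_cases hj : pos + 1 = j
    · have hc : pos < j ∧ j ≤ pos + ((m+1 : Nat) : Int) := by push_cast; omega
      have ht : (j - pos).toNat = 1 := by omega
      simp only [if_pos hj, if_pos hc, ht]
      rw [chaseN_succ_of_get hg]
      simp [chaseN]

    · rw [if_neg hj, ih v (pos+1) fuel hmin (by omega)]
      by_cases hc : pos + 1 < j ∧ j ≤ pos + 1 + (m : Int)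
      · have hc' : pos < j ∧ j ≤ pos + ((m+1 : Nat) : Int) := by push_cast at hc ⊢; omega
        rw [if_pos hc, if_pos hc']
        have ht : (j - pos).toNat = (j - (pos+1)).toNat + 1 := by omega
        rw [ht, chaseN_succ_of_get hg]
      · have hc' : ¬ (pos < j ∧ j ≤ pos + ((m+1 : Nat) : Int)) := by push_cast at hc ⊢; omega
        rw [if_neg hc, if_neg hc']

theorem chaseN_isSome_of_minFix {buch : List Int} : ∀ (m : Nat) (i : Int) (k : Nat),
    MinFix buch i m → k ≤ m → ∃ w, chaseN buch k i = some w := by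
  intro m
  induction m with
  | zero =>
    intro i k _ hk
    interval_cases k
    exact ⟨i, rfl⟩
  | succ m ih =>
    intro i k h hk
    obtain ⟨v, hg, _, hmin⟩ := minFix_succ h
    cases k with
    | zero => exact ⟨i, rfl⟩
    | succ k =>
      obtain ⟨w, hw⟩ := ih v k hmin (by omega)
      exact ⟨w, by rw [chaseN_succ_of_get hg]; exact hw⟩

-- ===== VERDICT (by name: the statement is the Claim_ definition above) =====
theorem eintrag_spec : Claim_equal_eintrag := by
  intro buch i j _ hpre
  unfold Spec_eintrag
  obtain ⟨n, hn, hfix⟩ := hpre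
  rw [List.mem_range] at hn
  -- minimal number of steps to the self-loop
  have hex : ∃ k, fixAt buch i k = true := ⟨n, hfix⟩
  set m := Nat.find hex with hm
  have hmfix : MinFix buch i m :=
    ⟨Nat.find_spec hex, fun k hk => by
      have := Nat.find_min hex hk
      simpa using this⟩
  have hmle : m < buch.length + 1 := lt_of_le_of_lt (Nat.find_min' hex hfix) hn
  -- evaluate both ports
  unfold eintrag laenge eintrag_alt
  rw [laengeLoop_eq m i 1 (buch.length+1) hmfix hmle,
      buildChain_eq m i [i] (buch.length+1) hmfix hmle]
  simp only [List.reverse_singleton, List.singleton_append, List.length_cons,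
    tailChain_length m i hmfix]
  by_cases hbig : j ≥ 1 + (m : Int)
  · have hB : ¬ (1 ≤ j ∧ j < ((m + 1 : Nat) : Int)) := by push_cast; omega
    rw [if_pos hbig, if_neg hB]
  · rw [if_neg hbig, eintragLoop_eq j m i 0 (buch.length+1) hmfix hmle]
    by_cases hpos : 1 ≤ j
    · have hc1 : (0:Int) < j ∧ j ≤ 0 + (m : Int) := by omega
      have hc2 : 1 ≤ j ∧ j < ((m + 1 : Nat) : Int) := by push_cast; omega
      rw [if_pos hc1, if_pos hc2]
      have hjn : 1 ≤ j.toNat ∧ j.toNat ≤ m := by omega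
      have hj' : j = ((j.toNat : Nat) : Int) := by omega
      have hget : PySem.List.pyGet? (i :: tailChain buch m i) j =
          (tailChain buch m i)[j.toNat - 1]? := by
        rw [hj', PySem.List.pyGet?_natCast]
        simp only [Int.toNat_natCast]
        have hs : j.toNat = (j.toNat - 1) + 1 := by omega
        conv_lhs => rw [hs]
        rw [List.getElem?_cons_succ]
      rw [hget, tailChain_elem m i (j.toNat - 1) hmfix (by omega)]
      rw [show j - 0 = j from sub_zero j]
      have hkk : j.toNat - 1 + 1 = j.toNat := by omega
      rw [hkk]
      obtain ⟨w, hw⟩ := chaseN_isSome_of_minFix m i j.toNat hmfix (by omega)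
      rw [hw]
      rfl
    · have hc1 : ¬ ((0:Int) < j ∧ j ≤ 0 + (m : Int)) := by omega
      have hc2 : ¬ (1 ≤ j ∧ j < ((m + 1 : Nat) : Int)) := by omega
      rw [if_neg hc1, if_neg hc2]
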